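-- pv_equiv track=rewrite | github.com/Catoons/CS-112 | Assingments/PA3.py | more_mults
-- ===== SOURCE A (Python) =====
-- def more_mults(lst1_bottom, lst1_top, lst2_bottom, lst2_top, factor):
--
--     x = lst1_bottom
--     y = lst2_bottom
--     inbetween1 = 0
--     inbetween2 = 0
--
-- #counts the numbers in between the bottom and top of list1
--
--     while x < lst1_top:
--         x += 1
--         inbetween1 += 1
--
-- #counts the numbers in between bottom and top of list2
--
--     while y < lst2_top:
--         y += 1
--         inbetween2 += 1
--
--
--     lst1_nums = 0
--     lst2_nums = 0
--
-- #counts the number of factors in between bottom and top of list1,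
-- #and sets the total number to list1_nums
--
--     while lst1_bottom < lst1_top:
--
--         if (factor + lst1_bottom) > lst1_top:
--             pass
--         else:
--             lst1_nums += 1
--         lst1_bottom += factor
--
-- #same thing but for list 2
--
--     while lst2_bottom < lst2_top:
--
--         if (factor + lst2_bottom) > lst2_top:
--             pass
--         else:
--             lst2_nums += 1
--         lst2_bottom += factor
--
-- #returns the list with more factors, or, if they are equal, checks
-- #the length of the list and will return the shorter list
-- #if both have same number of factors and length, it is a tie
--
--     if lst1_nums > lst2_nums:
--         return 'List 1'
--
--     elif lst1_nums < lst2_nums: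
--         return 'List 2'
--
--     elif lst1_nums == lst2_nums:
--         if inbetween1 > inbetween2:
--             return 'List 2'
--         elif inbetween1 < inbetween2:
--             return 'List 1'
--         else:
--             return 'Tie'
-- ===== SOURCE B (Python) =====
-- def more_mults(lst1_bottom, lst1_top, lst2_bottom, lst2_top, factor):
--     w1 = lst1_top - lst1_bottom if lst1_top > lst1_bottom else 0
--     w2 = lst2_top - lst2_bottom if lst2_top > lst2_bottom else 0
--     c1 = w1 // factor if w1 else 0
--     c2 = w2 // factor if w2 else 0
--     if c1 != c2:
--         return 'List 1' if c1 > c2 else 'List 2'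
--     if w1 != w2:
--         return 'List 2' if w1 > w2 else 'List 1'
--     return 'Tie'
-- ===== Notes on version B (the rewrite author's own statement) =====
-- stated objective: faster
-- what changed: Replaced all four counting while-loops by closed-form arithmetic: widths are differences clamped at 0 and multiple counts are a single floor division each.
import Mathlib
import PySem

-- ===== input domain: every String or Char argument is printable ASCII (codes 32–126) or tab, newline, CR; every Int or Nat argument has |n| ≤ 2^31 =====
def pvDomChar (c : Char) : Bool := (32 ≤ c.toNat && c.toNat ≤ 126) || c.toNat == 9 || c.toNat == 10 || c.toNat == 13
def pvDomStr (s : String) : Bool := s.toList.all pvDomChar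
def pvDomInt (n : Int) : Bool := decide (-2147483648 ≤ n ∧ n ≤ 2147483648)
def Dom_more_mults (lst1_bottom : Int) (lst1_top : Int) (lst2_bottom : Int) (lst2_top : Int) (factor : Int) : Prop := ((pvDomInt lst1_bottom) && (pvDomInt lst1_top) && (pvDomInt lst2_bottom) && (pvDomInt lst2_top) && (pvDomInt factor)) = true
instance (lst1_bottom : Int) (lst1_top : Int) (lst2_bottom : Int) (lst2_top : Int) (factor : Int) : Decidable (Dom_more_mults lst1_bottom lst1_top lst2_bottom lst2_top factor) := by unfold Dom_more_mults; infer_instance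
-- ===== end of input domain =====

-- B replaces A's four counting while-loops by closed-form arithmetic (clamped
-- differences and one floor division per range): asymptotically faster, O(1).

-- ===== PORT A =====
-- A's first two while-loops: 'while x < top: x += 1; acc += 1'
def pvWidthLoop (x : Int) (top : Int) (acc : Int) : Int :=
  if x < top then pvWidthLoop (x + 1) top (acc + 1) else acc
termination_by (top - x).toNat
decreasing_by omega

-- A's factor loops: 'while b < top: (if factor + b > top then pass else acc += 1); b += factor'.
-- The '0 < f' conjunct only makes the recursion total: with f ≤ 0 and b < top the Python loop diverges (excluded by Pre_).
def pvCountLoop (b : Int) (top : Int) (f : Int) (acc : Int) : Int :=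
  if _h : b < top ∧ 0 < f then
    pvCountLoop (b + f) top f (if f + b > top then acc else acc + 1)
  else acc
termination_by (top - b).toNat
decreasing_by omega

def more_mults (lst1_bottom : Int) (lst1_top : Int) (lst2_bottom : Int) (lst2_top : Int) (factor : Int) : String :=
  let inbetween1 := pvWidthLoop lst1_bottom lst1_top 0
  let inbetween2 := pvWidthLoop lst2_bottom lst2_top 0
  let lst1_nums := pvCountLoop lst1_bottom lst1_top factor 0
  let lst2_nums := pvCountLoop lst2_bottom lst2_top factor 0
  if lst1_nums > lst2_nums then "List 1"
  else if lst1_nums < lst2_nums then "List 2"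
  else  -- Python's 'elif lst1_nums == lst2_nums' is exhaustively true here
    if inbetween1 > inbetween2 then "List 2"
    else if inbetween1 < inbetween2 then "List 1"
    else "Tie"

-- ===== PORT B =====
def more_mults_alt (lst1_bottom : Int) (lst1_top : Int) (lst2_bottom : Int) (lst2_top : Int) (factor : Int) : String :=
  let w1 := if lst1_top > lst1_bottom then lst1_top - lst1_bottom else 0
  let w2 := if lst2_top > lst2_bottom then lst2_top - lst2_bottom else 0
  let c1 := if w1 ≠ 0 then PySem.Int.floordiv w1 factor else 0
  let c2 := if w2 ≠ 0 then PySem.Int.floordiv w2 factor else 0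
  if c1 ≠ c2 then (if c1 > c2 then "List 1" else "List 2")
  else if w1 ≠ w2 then (if w1 > w2 then "List 2" else "List 1")
  else "Tie"

-- ===== PRECONDITION & SPEC =====
-- Pre_ excludes exactly the inputs on which A does not terminate: factor ≤ 0 with a nonempty range
-- makes A's 'b += factor' loop run forever; A returns on every input admitted here.
def Pre_more_mults (lst1_bottom : Int) (lst1_top : Int) (lst2_bottom : Int) (lst2_top : Int) (factor : Int) : Prop :=
  0 < factor ∨ (lst1_top ≤ lst1_bottom ∧ lst2_top ≤ lst2_bottom)
instance (lst1_bottom : Int) (lst1_top : Int) (lst2_bottom : Int) (lst2_top : Int) (factor : Int) : Decidable (Pre_more_mults lst1_bottom lst1_top lst2_bottom lst2_top factor) := by unfold Pre_more_mults; infer_instance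

def pvWitness_more_mults : Int × Int × Int × Int × Int := (1, 10, 2, 8, 3)

def Spec_more_mults (lst1_bottom : Int) (lst1_top : Int) (lst2_bottom : Int) (lst2_top : Int) (factor : Int) (out : String) : Prop := out = more_mults_alt lst1_bottom lst1_top lst2_bottom lst2_top factor
instance (lst1_bottom : Int) (lst1_top : Int) (lst2_bottom : Int) (lst2_top : Int) (factor : Int) (out : String) : Decidable (Spec_more_mults lst1_bottom lst1_top lst2_bottom lst2_top factor out) := by unfold Spec_more_mults; infer_instance

-- ===== CLAIM (what is proved, stated in full; the proofs are below) =====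
def Claim_equal_more_mults : Prop := ∀ (lst1_bottom : Int) (lst1_top : Int) (lst2_bottom : Int) (lst2_top : Int) (factor : Int), Dom_more_mults lst1_bottom lst1_top lst2_bottom lst2_top factor → Pre_more_mults lst1_bottom lst1_top lst2_bottom lst2_top factor → Spec_more_mults lst1_bottom lst1_top lst2_bottom lst2_top factor (more_mults lst1_bottom lst1_top lst2_bottom lst2_top factor)

-- ===== LEMMAS AND PROOFS =====

theorem pvWidthLoop_eq (x top acc : Int) : pvWidthLoop x top acc = acc + max (top - x) 0 := by
  by_cases h : x < top
  · rw [pvWidthLoop, if_pos h, pvWidthLoop_eq (x + 1) top (acc + 1)]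
    omega
  · rw [pvWidthLoop, if_neg h]; omega
termination_by (top - x).toNat
decreasing_by omega

theorem pvCountLoop_eq (b top f acc : Int) (hf : 0 < f) (hb : b < top) :
    pvCountLoop b top f acc = acc + PySem.Int.floordiv (top - b) f := by
  rw [pvCountLoop, dif_pos ⟨hb, hf⟩]
  by_cases h2 : b + f < top
  · rw [pvCountLoop_eq (b + f) top f _ hf h2]
    have h3 : ¬ (f + b > top) := by omega
    rw [if_neg h3]
    have e1 : PySem.Int.floordiv (top - b) f = (top - b) / f :=
      PySem.Int.floordiv_eq_ediv_of_pos hf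
    have e2 : PySem.Int.floordiv (top - (b + f)) f = (top - (b + f)) / f :=
      PySem.Int.floordiv_eq_ediv_of_pos hf
    have key : (top - (b + f)) / f + 1 = (top - b) / f := by
      have h4 := Int.add_mul_ediv_right (top - (b + f)) 1 (show f ≠ 0 by omega)
      have h5 : top - (b + f) + 1 * f = top - b := by ring
      rw [h5] at h4
      omega
    rw [e1, e2]
    omega
  · -- last iteration: the recursive call returns its accumulator
    rw [pvCountLoop, dif_neg (by omega)]
    have hd : PySem.Int.floordiv (top - b) f = if f + b > top then 0 else 1 := by
      rw [PySem.Int.floordiv_eq_iff_of_pos hf]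
      split_ifs <;> constructor <;> omega
    rw [hd]
    split_ifs <;> omega
termination_by (top - b).toNat
decreasing_by omega

theorem pvCountLoop_empty (b top f acc : Int) (hb : ¬ b < top) : pvCountLoop b top f acc = acc := by
  rw [pvCountLoop, dif_neg (by omega)]

-- ===== VERDICT (by name: the statement is the Claim_ definition above) =====
theorem more_mults_spec : Claim_equal_more_mults := by
  intro b1 t1 b2 t2 f _ hpre
  unfold Spec_more_mults more_mults more_mults_alt
  have hw1 := pvWidthLoop_eq b1 t1 0
  have hw2 := pvWidthLoop_eq b2 t2 0
  have hc1 : pvCountLoop b1 t1 f 0 =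
      (if (if t1 > b1 then t1 - b1 else 0) ≠ 0 then PySem.Int.floordiv (if t1 > b1 then t1 - b1 else 0) f else 0) := by
    by_cases h : b1 < t1
    · have hf : 0 < f := by rcases hpre with h' | h' <;> omega
      rw [pvCountLoop_eq b1 t1 f 0 hf h, if_pos (by omega), if_pos (by omega)]
      omega
    · rw [pvCountLoop_empty b1 t1 f 0 h, if_neg (by omega)]
  have hc2 : pvCountLoop b2 t2 f 0 =
      (if (if t2 > b2 then t2 - b2 else 0) ≠ 0 then PySem.Int.floordiv (if t2 > b2 then t2 - b2 else 0) f else 0) := by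
    by_cases h : b2 < t2
    · have hf : 0 < f := by rcases hpre with h' | h' <;> omega
      rw [pvCountLoop_eq b2 t2 f 0 hf h, if_pos (by omega), if_pos (by omega)]
      omega
    · rw [pvCountLoop_empty b2 t2 f 0 h, if_neg (by omega)]
  simp only [hw1, hw2, hc1, hc2]
  split_ifs <;> first | rfl | omega
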